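-- pv_equiv track=rewrite | github.com/MashMaleLLO/ClassDocs | Semister 2-2/DataStructure Lab/Lab8/lab8.3.py | somethingDrome
-- ===== SOURCE A (Python) =====
-- def somethingDrome(arr):
--     if all(arr[i] == arr[i+1] for i in range(len(arr)-1)):
--         return "Repdrome"
--     elif all(arr[i] <= arr[i+1] for i in range(len(arr)-1)):
--         for i in range(len(arr)):
--             for j in range(i+1, len(arr)):
--                 if arr[i] == arr[j]:
--                     return "Plaindrome"
--         return "Metadrome"
--     elif all(arr[i] >= arr[i+1] for i in range(len(arr)-1)):
--         for i in range(len(arr)):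
--             for j in range(i+1, len(arr)):
--                 if arr[i] == arr[j]:
--                     return "Nialpdrome"
--         return "Katadrome"
--     else:
--         return "Nondrome"
-- ===== SOURCE B (Python) =====
-- def somethingDrome(arr):
--     nondec = True
--     noninc = True
--     anyeq = False
--     for x, y in zip(arr, arr[1:]):
--         if x < y:
--             noninc = False
--         elif x > y:
--             nondec = False
--         else:
--             anyeq = True
--     if nondec and noninc:
--         return "Repdrome"
--     if nondec:
--         return "Plaindrome" if anyeq else "Metadrome"
--     if noninc:
--         return "Nialpdrome" if anyeq else "Katadrome"
--     return "Nondrome"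
-- ===== Notes on version B (the rewrite author's own statement) =====
-- stated objective: faster
-- what changed: One linear pass over adjacent pairs computes nondecreasing/nonincreasing/any-adjacent-equal flags; since duplicates in a monotone list must be adjacent, this replaces A's three index scans plus an O(n^2) nested duplicate search.
import Mathlib
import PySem

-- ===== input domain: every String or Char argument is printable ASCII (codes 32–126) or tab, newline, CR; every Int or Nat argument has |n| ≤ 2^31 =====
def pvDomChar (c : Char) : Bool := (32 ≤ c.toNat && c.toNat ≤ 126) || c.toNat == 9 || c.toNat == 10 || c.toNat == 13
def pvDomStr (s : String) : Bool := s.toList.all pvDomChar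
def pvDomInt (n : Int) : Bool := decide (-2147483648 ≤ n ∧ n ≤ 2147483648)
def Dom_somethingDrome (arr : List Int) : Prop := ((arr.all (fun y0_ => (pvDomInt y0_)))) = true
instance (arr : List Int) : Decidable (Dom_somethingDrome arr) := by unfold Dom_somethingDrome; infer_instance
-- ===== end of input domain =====

-- B replaces A's three index scans and nested duplicate search by one linear pass over adjacent
-- pairs (a duplicate in a monotone list forces an adjacent equal pair); equal on all inputs.

-- ===== PORT A =====
-- all(arr[i] <op> arr[i+1] for i in range(len(arr)-1)); the indices are always in range, so pyGetD is exact here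
def pvAllAdj (arr : List Int) (f : Int → Int → Bool) : Bool :=
  (PySem.List.pyRange 0 ((arr.length : Int) - 1) 1).all
    (fun i => f (PySem.List.pyGetD arr i 0) (PySem.List.pyGetD arr (i + 1) 0))

-- the nested 'for i … for j in range(i+1, …): if arr[i] == arr[j]: return …' early-return scan
def pvDupScan (arr : List Int) : Bool :=
  (PySem.List.pyRange 0 (arr.length : Int) 1).any (fun i =>
    (PySem.List.pyRange (i + 1) (arr.length : Int) 1).any (fun j =>
      PySem.List.pyGetD arr i 0 == PySem.List.pyGetD arr j 0))

def somethingDrome (arr : List Int) : String :=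
  if pvAllAdj arr (fun a b => a == b) then "Repdrome"
  else if pvAllAdj arr (fun a b => decide (a ≤ b)) then
    (if pvDupScan arr then "Plaindrome" else "Metadrome")
  else if pvAllAdj arr (fun a b => decide (b ≤ a)) then
    (if pvDupScan arr then "Nialpdrome" else "Katadrome")
  else "Nondrome"

-- ===== PORT B =====
-- the single pass of Source B: state (nondec, noninc, anyeq) folded over zip(arr, arr[1:])
def pvScanPairs (arr : List Int) : Bool × Bool × Bool :=
  (arr.zip (PySem.List.slice arr (some 1) none)).foldl
    (fun st p =>
      if p.1 < p.2 then (st.1, false, st.2.2)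
      else if p.1 > p.2 then (false, st.2.1, st.2.2)
      else (st.1, st.2.1, true))
    (true, true, false)

def somethingDrome_alt (arr : List Int) : String :=
  let s := pvScanPairs arr
  if s.1 && s.2.1 then "Repdrome"
  else if s.1 then (if s.2.2 then "Plaindrome" else "Metadrome")
  else if s.2.1 then (if s.2.2 then "Nialpdrome" else "Katadrome")
  else "Nondrome"

-- ===== PRECONDITION & SPEC =====
def Spec_somethingDrome (arr : List Int) (out : String) : Prop := out = somethingDrome_alt arr
instance (arr : List Int) (out : String) : Decidable (Spec_somethingDrome arr out) := by unfold Spec_somethingDrome; infer_instance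

-- ===== CLAIM (what is proved, stated in full; the proofs are below) =====
def Claim_equal_somethingDrome : Prop := ∀ (arr : List Int), Dom_somethingDrome arr → Spec_somethingDrome arr (somethingDrome arr)

-- ===== LEMMAS AND PROOFS =====

theorem adj_getD (arr : List Int) (f : Int → Int → Bool) (k : Nat) (hk : k + 1 < arr.length) :
    f (PySem.List.pyGetD arr (↑k) 0) (PySem.List.pyGetD arr (↑k + 1) 0) = f arr[k] arr[k+1] := by
  have e1 : ((k : Int) + 1) = ((k + 1 : Nat) : Int) := by push_cast; ring
  rw [e1, PySem.List.pyGetD_natCast, PySem.List.pyGetD_natCast,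
    List.getD_eq_getElem _ _ (by omega : k < arr.length),
    List.getD_eq_getElem _ _ hk]

theorem pvAllAdj_iff (arr : List Int) (f : Int → Int → Bool) :
    pvAllAdj arr f = true ↔ ∀ k (_ : k + 1 < arr.length), f arr[k] arr[k+1] = true := by
  rw [pvAllAdj, PySem.List.pyRange_one]
  simp only [List.all_map, List.all_eq_true, List.mem_range, zero_add, Int.sub_zero,
    Function.comp_apply]
  constructor
  · intro h k hk
    have := h k (by omega)
    rwa [adj_getD arr f k hk] at this
  · intro h k hk
    have hk1 : k + 1 < arr.length := by omega
    rw [adj_getD arr f k hk1]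
    exact h k hk1

theorem pvDupScan_iff (arr : List Int) :
    pvDupScan arr = true ↔
      ∃ i j, ∃ (_ : i < arr.length) (_ : j < arr.length), i < j ∧ arr[i] = arr[j] := by
  simp only [pvDupScan, PySem.List.pyRange_one, List.any_map, List.any_eq_true,
    List.mem_range, Function.comp_apply, zero_add, Int.sub_zero, Int.toNat_natCast]
  constructor
  · rintro ⟨k, hk, m, hm, hf⟩
    have e : ((k : Int) + 1 + (m : Int)) = ((k + 1 + m : Nat) : Int) := by push_cast; ring
    rw [e, PySem.List.pyGetD_natCast, PySem.List.pyGetD_natCast] at hf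
    have hj : k + 1 + m < arr.length := by omega
    refine ⟨k, k + 1 + m, by omega, hj, by omega, ?_⟩
    rw [List.getD_eq_getElem _ _ (by omega : k < arr.length),
      List.getD_eq_getElem _ _ hj] at hf
    exact beq_iff_eq.1 hf
  · rintro ⟨i, j, hi, hj, hij, heq⟩
    refine ⟨i, hi, j - i - 1, by omega, ?_⟩
    have e : ((i : Int) + 1 + ((j - i - 1 : Nat) : Int)) = ((j : Nat) : Int) := by
      push_cast; omega
    rw [e, PySem.List.pyGetD_natCast, PySem.List.pyGetD_natCast,
      List.getD_eq_getElem _ _ hi, List.getD_eq_getElem _ _ hj]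
    exact beq_iff_eq.2 heq

theorem zip_all_iff (arr : List Int) (f : Int × Int → Bool) :
    (arr.zip arr.tail).all f = true ↔
      ∀ k (_ : k + 1 < arr.length), f (arr[k], arr[k+1]) = true := by
  have hlen : (arr.zip arr.tail).length = arr.length - 1 := by
    simp [List.length_zip, List.length_tail]
  rw [List.all_eq_true]
  constructor
  · intro h k hk
    have hk' : k < (arr.zip arr.tail).length := by omega
    have := h _ (List.getElem_mem hk')
    rwa [List.getElem_zip, List.getElem_tail] at this
  · intro h x hx
    obtain ⟨k, hk, rfl⟩ := List.mem_iff_getElem.1 hx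
    rw [List.getElem_zip, List.getElem_tail]
    exact h k (by omega)

theorem zip_any_iff (arr : List Int) (f : Int × Int → Bool) :
    (arr.zip arr.tail).any f = true ↔
      ∃ k, ∃ (_ : k + 1 < arr.length), f (arr[k], arr[k+1]) = true := by
  have hlen : (arr.zip arr.tail).length = arr.length - 1 := by
    simp [List.length_zip, List.length_tail]
  rw [List.any_eq_true]
  constructor
  · rintro ⟨x, hx, hfx⟩
    obtain ⟨k, hk, rfl⟩ := List.mem_iff_getElem.1 hx
    rw [List.getElem_zip, List.getElem_tail] at hfx
    exact ⟨k, by omega, hfx⟩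
  · rintro ⟨k, hk, hf⟩
    have hk' : k < (arr.zip arr.tail).length := by omega
    refine ⟨_, List.getElem_mem hk', ?_⟩
    rwa [List.getElem_zip, List.getElem_tail]

theorem scan_fold (P : List (Int × Int)) (a b c : Bool) :
    P.foldl (fun st p =>
      if p.1 < p.2 then (st.1, false, st.2.2)
      else if p.1 > p.2 then (false, st.2.1, st.2.2)
      else (st.1, st.2.1, true)) (a, b, c) =
    (a && P.all (fun p => decide (p.1 ≤ p.2)),
     b && P.all (fun p => decide (p.2 ≤ p.1)),
     c || P.any (fun p => p.1 == p.2)) := by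
  induction P generalizing a b c with
  | nil => simp
  | cons p P ih =>
    simp only [List.foldl_cons, List.all_cons, List.any_cons]
    rcases lt_trichotomy p.1 p.2 with h | h | h
    · rw [if_pos h, ih]
      simp [h.le, not_le.2 h, beq_eq_false_iff_ne.2 h.ne]
    · rw [if_neg (by omega : ¬ p.1 < p.2), if_neg (by omega : ¬ p.1 > p.2), ih]
      simp [h]
    · rw [if_neg (by omega : ¬ p.1 < p.2), if_pos h, ih]
      simp [not_le.2 h, le_of_lt h, beq_eq_false_iff_ne.2 h.ne']

theorem pvScanPairs_eq (arr : List Int) :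
    pvScanPairs arr =
      ((arr.zip arr.tail).all (fun p => decide (p.1 ≤ p.2)),
       (arr.zip arr.tail).all (fun p => decide (p.2 ≤ p.1)),
       (arr.zip arr.tail).any (fun p => p.1 == p.2)) := by
  rw [pvScanPairs, PySem.List.slice_from_one, scan_fold]
  simp

theorem rel_of_adj (arr : List Int) (r : Int → Int → Prop) (htr : Transitive r)
    (h : ∀ k (_ : k + 1 < arr.length), r arr[k] arr[k+1]) :
    ∀ d i (_ : i + d + 1 < arr.length), r arr[i] arr[i + d + 1] := by
  intro d
  induction d with
  | zero => intro i h2; simpa using h i (by simpa using h2)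
  | succ d ih =>
    intro i h2
    have h1 : r arr[i] arr[i + d + 1] := ih i (by omega)
    have h3 : r arr[i + d + 1] arr[i + d + 1 + 1] := h (i + d + 1) (by omega)
    have e : i + (d + 1) + 1 = i + d + 1 + 1 := by omega
    simp only [e]
    exact htr h1 h3

-- in a monotone list, a duplicate forces an adjacent equal pair
theorem dup_iff_adj (arr : List Int)
    (hmono : (∀ k (_ : k + 1 < arr.length), arr[k] ≤ arr[k+1]) ∨
             (∀ k (_ : k + 1 < arr.length), arr[k+1] ≤ arr[k])) :
    (∃ i j, ∃ (_ : i < arr.length) (_ : j < arr.length), i < j ∧ arr[i] = arr[j]) ↔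
      ∃ k, ∃ (_ : k + 1 < arr.length), arr[k] = arr[k+1] := by
  constructor
  · rintro ⟨i, j, hi, hj, hij, heq⟩
    by_contra hno
    push_neg at hno
    have e : i + (j - i - 1) + 1 = j := by omega
    rcases hmono with hle | hge
    · have hstrict : ∀ k (_ : k + 1 < arr.length), arr[k] < arr[k+1] :=
        fun k hk => lt_of_le_of_ne (hle k hk) (hno k hk)
      have := rel_of_adj arr (· < ·) (fun _ _ _ => lt_trans) hstrict (j - i - 1) i (by omega)
      simp only [e] at this
      exact absurd heq (ne_of_lt this)
    · have hstrict : ∀ k (_ : k + 1 < arr.length), arr[k+1] < arr[k] :=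
        fun k hk => lt_of_le_of_ne (hge k hk) (fun hc => hno k hk hc.symm)
      have := rel_of_adj arr (fun a b => b < a) (fun _ _ _ h1 h2 => lt_trans h2 h1)
        hstrict (j - i - 1) i (by omega)
      simp only [e] at this
      exact absurd heq (ne_of_gt this)
  · rintro ⟨k, hk, heq⟩
    exact ⟨k, k + 1, by omega, hk, by omega, heq⟩

-- ===== VERDICT (by name: the statement is the Claim_ definition above) =====
theorem somethingDrome_spec : Claim_equal_somethingDrome := by
  intro arr _
  show somethingDrome arr = somethingDrome_alt arr
  rw [somethingDrome, somethingDrome_alt, pvScanPairs_eq]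
  have e1 : pvAllAdj arr (fun a b => a == b) =
      ((arr.zip arr.tail).all (fun p => decide (p.1 ≤ p.2)) &&
       (arr.zip arr.tail).all (fun p => decide (p.2 ≤ p.1))) := by
    rw [Bool.eq_iff_iff, pvAllAdj_iff, Bool.and_eq_true, zip_all_iff, zip_all_iff]
    constructor
    · intro h
      exact ⟨fun k hk => by simpa using le_of_eq (by simpa using h k hk),
             fun k hk => by simpa using ge_of_eq (by simpa using h k hk)⟩
    · rintro ⟨h1, h2⟩ k hk
      simpa using le_antisymm (by simpa using h1 k hk) (by simpa using h2 k hk)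
  have e2 : pvAllAdj arr (fun a b => decide (a ≤ b)) =
      (arr.zip arr.tail).all (fun p => decide (p.1 ≤ p.2)) := by
    rw [Bool.eq_iff_iff, pvAllAdj_iff, zip_all_iff]
  have e3 : pvAllAdj arr (fun a b => decide (b ≤ a)) =
      (arr.zip arr.tail).all (fun p => decide (p.2 ≤ p.1)) := by
    rw [Bool.eq_iff_iff, pvAllAdj_iff, zip_all_iff]
  have e4 : ((∀ k (_ : k + 1 < arr.length), arr[k] ≤ arr[k+1]) ∨
             (∀ k (_ : k + 1 < arr.length), arr[k+1] ≤ arr[k])) →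
      pvDupScan arr = (arr.zip arr.tail).any (fun p => p.1 == p.2) := by
    intro hmono
    rw [Bool.eq_iff_iff, pvDupScan_iff, zip_any_iff, dup_iff_adj arr hmono]
    constructor
    · rintro ⟨k, hk, heq⟩; exact ⟨k, hk, by simpa using heq⟩
    · rintro ⟨k, hk, heq⟩; exact ⟨k, hk, by simpa using heq⟩
  rw [e1, e2, e3]
  cases hb1 : (arr.zip arr.tail).all (fun p => decide (p.1 ≤ p.2)) with
  | false =>
    cases hb2 : (arr.zip arr.tail).all (fun p => decide (p.2 ≤ p.1)) with
    | false => simp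
    | true =>
      have := e4 (Or.inr (fun k hk => by
        simpa using (zip_all_iff arr _).1 hb2 k hk))
      rw [this]
  | true =>
    have := e4 (Or.inl (fun k hk => by
      simpa using (zip_all_iff arr _).1 hb1 k hk))
    rw [this]
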